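-- pv_equiv track=rewrite | github.com/Lerskk/ProgrammingII-C | theory/codigo.py | verificarFichasFlotantes
-- ===== SOURCE A (Python) =====
-- def verificarFichasFlotantes(tablero, tamanio):
--     columnaFichaFlotante = -1 # Si no se encuentra ninguna ficha flotante, esta variable seguira siendo -1 y se devolvera ese valor
--
--     for columna in range(tamanio-1): # Recorrer por columnas
--         encontroFichaVacia = False # Reiniciar bandera por cada columna
--
--         for fila in range(tamanio-1, -1, -1): # Recorrer fichas de la columna de abajo hacia arriba
--             if tablero[fila][columna] == "_": # Una vez encontrada una casilla vacia, lo marco para saber que en lo que resta de la fila, dado que recorro de abajo hacia arriba, no deberia haber ninguna casilla no vacia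
--                 encontroFichaVacia = True
--             elif encontroFichaVacia: # Si se encuentra una casilla no vacia y ya se habia encontrado una casilla vacia, entonces la casilla actual tiene una ficha flotante y guardo la columna
--                 columnaFichaFlotante = columna
--
--     return columnaFichaFlotante
-- ===== SOURCE B (Python) =====
-- def verificarFichasFlotantes(tablero, tamanio):
--     # Scan columns from the highest index down and return the first (= largest)
--     # column whose lowest empty cell lies below its highest piece.
--     for columna in range(tamanio - 2, -1, -1):
--         piezas = [fila for fila in range(tamanio) if tablero[fila][columna] != "_"]
--         vacias = [fila for fila in range(tamanio) if tablero[fila][columna] == "_"]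
--         if piezas and vacias and vacias[-1] > piezas[0]:
--             return columna
--     return -1
-- ===== Notes on version B (the rewrite author's own statement) =====
-- stated objective: alternative
-- what changed: Replaces A's flag-carrying bottom-up scan with last-match overwrite across all columns by a per-column min-piece/max-empty position test, scanning columns from the highest index down and returning the first qualifying column.
import Mathlib
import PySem

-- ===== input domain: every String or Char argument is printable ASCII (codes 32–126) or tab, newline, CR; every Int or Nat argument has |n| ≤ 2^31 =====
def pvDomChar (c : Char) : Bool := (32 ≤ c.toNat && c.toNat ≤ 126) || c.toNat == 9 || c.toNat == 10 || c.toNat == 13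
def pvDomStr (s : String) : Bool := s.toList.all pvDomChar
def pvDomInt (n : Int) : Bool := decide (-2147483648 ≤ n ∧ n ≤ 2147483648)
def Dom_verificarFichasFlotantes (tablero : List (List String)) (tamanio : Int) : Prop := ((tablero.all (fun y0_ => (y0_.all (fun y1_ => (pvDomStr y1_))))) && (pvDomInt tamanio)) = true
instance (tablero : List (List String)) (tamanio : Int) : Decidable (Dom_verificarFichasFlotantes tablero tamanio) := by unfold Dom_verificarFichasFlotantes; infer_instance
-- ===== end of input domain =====

-- B replaces A's flag-carrying bottom-up scan by a per-column min-piece/max-empty test and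
-- scans columns from the highest index down, returning the first hit (alternative decomposition; same cost).

-- cell accessor tablero[fila][columna]; in-range under Pre_, so the defaults are never reached there
def pvCell (tablero : List (List String)) (fila columna : Int) : String :=
  PySem.List.pyGetD (PySem.List.pyGetD tablero fila []) columna ""

-- ===== PORT A =====
def verificarFichasFlotantes (tablero : List (List String)) (tamanio : Int) : Int :=
  (PySem.List.pyRange 0 (tamanio - 1) 1).foldl
    (fun columnaFichaFlotante columna =>
      ((PySem.List.pyRange (tamanio - 1) (-1) (-1)).foldl
        (fun (st : Bool × Int) fila =>
          if pvCell tablero fila columna = "_" then (true, st.2)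
          else if st.1 then (st.1, columna) else st)
        (false, columnaFichaFlotante)).2)
    (-1)

-- ===== PORT B =====
def pvColCheck (tablero : List (List String)) (tamanio columna : Int) : Bool :=
  let piezas := (PySem.List.pyRange 0 tamanio 1).filter
      (fun fila => pvCell tablero fila columna ≠ "_")
  let vacias := (PySem.List.pyRange 0 tamanio 1).filter
      (fun fila => pvCell tablero fila columna = "_")
  match piezas.head?, vacias.getLast? with
  | some p, some e => decide (e > p)
  | _, _ => false

def verificarFichasFlotantes_alt (tablero : List (List String)) (tamanio : Int) : Int :=
  ((PySem.List.pyRange (tamanio - 2) (-1) (-1)).find?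
      (pvColCheck tablero tamanio)).getD (-1)

-- ===== PRECONDITION & SPEC =====
-- Pre_ excludes exactly the inputs where the Python A raises IndexError: boards with fewer
-- than tamanio rows, or a row among the first tamanio shorter than tamanio-1.
def Pre_verificarFichasFlotantes (tablero : List (List String)) (tamanio : Int) : Prop :=
  2 ≤ tamanio →
    (tamanio ≤ tablero.length ∧
      ∀ row ∈ tablero.take tamanio.toNat, tamanio - 1 ≤ (row.length : Int))
instance (tablero : List (List String)) (tamanio : Int) : Decidable (Pre_verificarFichasFlotantes tablero tamanio) := by unfold Pre_verificarFichasFlotantes; infer_instance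

def pvWitness_verificarFichasFlotantes : List (List String) × Int :=
  ([["x", "_"], ["_", "x"]], 2)

def Spec_verificarFichasFlotantes (tablero : List (List String)) (tamanio : Int) (out : Int) : Prop := out = verificarFichasFlotantes_alt tablero tamanio
instance (tablero : List (List String)) (tamanio : Int) (out : Int) : Decidable (Spec_verificarFichasFlotantes tablero tamanio out) := by unfold Spec_verificarFichasFlotantes; infer_instance

-- ===== CLAIM (what is proved, stated in full; the proofs are below) =====
def Claim_equal_verificarFichasFlotantes : Prop := ∀ (tablero : List (List String)) (tamanio : Int), Dom_verificarFichasFlotantes tablero tamanio → Pre_verificarFichasFlotantes tablero tamanio → Spec_verificarFichasFlotantes tablero tamanio (verificarFichasFlotantes tablero tamanio)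

-- ===== LEMMAS AND PROOFS =====

-- "this cell is empty", for a fixed board and column
def pvEmp (tablero : List (List String)) (columna fila : Int) : Bool :=
  pvCell tablero fila columna = "_"

-- A's inner-loop pattern on a row list read left to right: an empty cell strictly before a piece
def pvHasPat (tablero : List (List String)) (columna : Int) : List Int → Bool
  | [] => false
  | f :: t => (pvEmp tablero columna f && t.any (fun g => ! pvEmp tablero columna g))
      || pvHasPat tablero columna t

-- the same pattern mirrored: a piece strictly before an empty cell
def pvHasPatR (tablero : List (List String)) (columna : Int) : List Int → Bool
  | [] => false
  | f :: t => ((! pvEmp tablero columna f) && t.any (pvEmp tablero columna))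
      || pvHasPatR tablero columna t

theorem pv_inner_fold (tablero : List (List String)) (columna : Int)
    (L : List Int) : ∀ (b : Bool) (r : Int),
    L.foldl
      (fun (st : Bool × Int) fila =>
        if pvCell tablero fila columna = "_" then (true, st.2)
        else if st.1 then (st.1, columna) else st)
      (b, r)
    = (b || L.any (pvEmp tablero columna),
       if (b && L.any (fun g => ! pvEmp tablero columna g))
          || pvHasPat tablero columna L then columna else r) := by
  induction L with
  | nil => intro b r; simp [pvHasPat]
  | cons f t ih =>
    intro b r
    by_cases hf : pvCell tablero f columna = "_"
    · have he : pvEmp tablero columna f = true := by simp [pvEmp, hf]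
      simp only [List.foldl_cons, hf, ih, pvHasPat, List.any_cons, he, if_true]
      cases b <;> cases ht : t.any (fun g => ! pvEmp tablero columna g) <;>
        cases hp : pvHasPat tablero columna t <;> simp
    · have he : pvEmp tablero columna f = false := by simp [pvEmp, hf]
      cases b with
      | true =>
        simp only [List.foldl_cons, if_neg hf, ih, pvHasPat, List.any_cons, he]
        simp
      | false =>
        simp only [List.foldl_cons, if_neg hf, ih, pvHasPat, List.any_cons, he]
        simp

theorem pv_hasPat_append (tablero : List (List String)) (columna : Int)
    (M : List Int) (x : Int) :
    pvHasPat tablero columna (M ++ [x])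
      = (pvHasPat tablero columna M
         || (M.any (pvEmp tablero columna) && ! pvEmp tablero columna x)) := by
  induction M with
  | nil => simp [pvHasPat]
  | cons a m ih =>
    simp only [List.cons_append, pvHasPat, List.any_append, List.any_cons, ih,
      List.any_nil]
    cases pvEmp tablero columna a <;> cases pvEmp tablero columna x <;>
      cases m.any (pvEmp tablero columna) <;>
      cases m.any (fun g => ! pvEmp tablero columna g) <;>
      cases pvHasPat tablero columna m <;> rfl

theorem pv_hasPat_reverse (tablero : List (List String)) (columna : Int)
    (L : List Int) :
    pvHasPat tablero columna L.reverse = pvHasPatR tablero columna L := by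
  induction L with
  | nil => rfl
  | cons a t ih =>
    simp only [List.reverse_cons, pv_hasPat_append, ih, pvHasPatR,
      List.any_reverse]
    cases pvEmp tablero columna a <;> cases t.any (pvEmp tablero columna) <;>
      cases pvHasPatR tablero columna t <;> rfl

theorem pv_patR_imp_any_emp (tablero : List (List String)) (columna : Int)
    (L : List Int) (h : pvHasPatR tablero columna L = true) :
    L.any (pvEmp tablero columna) = true := by
  induction L with
  | nil => simp [pvHasPatR] at h
  | cons a t ih =>
    simp only [pvHasPatR, Bool.or_eq_true, Bool.and_eq_true] at h
    rcases h with ⟨_, h2⟩ | h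
    · simp [List.any_cons, h2]
    · simp [List.any_cons, ih h]

-- on a strictly increasing row list, the mirrored pattern is B's min-piece / max-empty test
theorem pv_patR_eq_check (tablero : List (List String)) (columna : Int) :
    ∀ (L : List Int), L.Pairwise (· < ·) →
    pvHasPatR tablero columna L
      = (match (L.filter (fun f => pvCell tablero f columna ≠ "_")).head?,
               (L.filter (fun f => pvCell tablero f columna = "_")).getLast? with
         | some p, some e => decide (e > p)
         | _, _ => false) := by
  intro L hL
  induction L with
  | nil => rfl
  | cons a t ih =>
    have hlt : ∀ x ∈ t, a < x := (List.pairwise_cons.mp hL).1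
    have ht : t.Pairwise (· < ·) := (List.pairwise_cons.mp hL).2
    by_cases ha : pvCell tablero a columna = "_"
    · have he : pvEmp tablero columna a = true := by simp [pvEmp, ha]
      have hfp : (a :: t).filter (fun f => pvCell tablero f columna ≠ "_")
          = t.filter (fun f => pvCell tablero f columna ≠ "_") := by
        simp [ha]
      have hfe : (a :: t).filter (fun f => pvCell tablero f columna = "_")
          = a :: t.filter (fun f => pvCell tablero f columna = "_") := by
        simp [ha]
      have hgL : pvHasPatR tablero columna (a :: t) = pvHasPatR tablero columna t := by
        simp [pvHasPatR, he]
      rw [hgL, hfp, hfe, ih ht]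
      cases hp : (t.filter (fun f => pvCell tablero f columna ≠ "_")).head? with
      | none => rfl
      | some p =>
        have hpm : p ∈ t := by
          have := List.mem_of_mem_filter (List.mem_of_mem_head? hp)
          exact this
        have hap : a < p := hlt p hpm
        cases hv : (t.filter (fun f => pvCell tablero f columna = "_")) with
        | nil =>
          simp [show ¬ (a > p) from by omega]
        | cons e es =>
          simp only [List.getLast?_cons_cons]
    · have he : pvEmp tablero columna a = false := by simp [pvEmp, ha]
      have hfp : (a :: t).filter (fun f => pvCell tablero f columna ≠ "_")
          = a :: t.filter (fun f => pvCell tablero f columna ≠ "_") := by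
        simp [ha]
      have hfe : (a :: t).filter (fun f => pvCell tablero f columna = "_")
          = t.filter (fun f => pvCell tablero f columna = "_") := by
        simp [ha]
      have hgL : pvHasPatR tablero columna (a :: t)
          = (t.any (pvEmp tablero columna) || pvHasPatR tablero columna t) := by
        simp [pvHasPatR, he]
      rw [hgL, hfp, hfe]
      cases hv : (t.filter (fun f => pvCell tablero f columna = "_")).getLast? with
      | none =>
        have hnone : t.any (pvEmp tablero columna) = false := by
          rw [List.getLast?_eq_none_iff] at hv
          rw [List.any_eq_false]
          intro x hx
          simp only [pvEmp, decide_eq_true_eq]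
          intro hxe
          have : x ∈ t.filter (fun f => pvCell tablero f columna = "_") := by
            rw [List.mem_filter]; exact ⟨hx, by simp [hxe]⟩
          rw [hv] at this; simp at this
        have hgf : pvHasPatR tablero columna t = false := by
          cases hg : pvHasPatR tablero columna t with
          | false => rfl
          | true => rw [pv_patR_imp_any_emp tablero columna t hg] at hnone; cases hnone
        simp [hnone, hgf, List.head?_cons]
      | some e =>
        have hem : e ∈ t := by
          have hmem : e ∈ t.filter (fun f => pvCell tablero f columna = "_") :=
            List.mem_of_getLast? hv
          exact List.mem_of_mem_filter hmem
        have hae : a < e := hlt e hem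
        have hany : t.any (pvEmp tablero columna) = true := by
          rw [List.any_eq_true]
          refine ⟨e, hem, ?_⟩
          have : pvCell tablero e columna = "_" := by
            have hmem : e ∈ t.filter (fun f => pvCell tablero f columna = "_") :=
              List.mem_of_getLast? hv
            exact of_decide_eq_true (List.mem_filter.mp hmem).2
          simp [pvEmp, this]
        simp only [hany, Bool.true_or, List.head?_cons]
        simp [show e > a from hae]

-- A's overwrite loop over a list equals first-match search over its reverse
theorem pv_foldl_if_eq_find (P : Int → Bool) :
    ∀ (L : List Int) (r : Int),
    L.foldl (fun acc c => if P c then c else acc) r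
      = (L.reverse.find? P).getD r := by
  intro L
  induction L with
  | nil => intro r; rfl
  | cons a t ih =>
    intro r
    simp only [List.foldl_cons, List.reverse_cons, List.find?_append, ih]
    cases ht : t.reverse.find? P with
    | none =>
      simp only [Option.none_or]
      by_cases hp : P a = true <;> simp [hp]
    | some x => simp

-- per column, A's inner loop says "set to columna iff pvColCheck"
theorem pv_column_eq (tablero : List (List String)) (tamanio columna : Int) :
    ∀ r : Int,
    ((PySem.List.pyRange (tamanio - 1) (-1) (-1)).foldl
        (fun (st : Bool × Int) fila =>
          if pvCell tablero fila columna = "_" then (true, st.2)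
          else if st.1 then (st.1, columna) else st)
        (false, r)).2
    = if pvColCheck tablero tamanio columna then columna else r := by
  intro r
  rw [pv_inner_fold]
  simp only [Bool.false_and, Bool.false_or]
  have hrev : PySem.List.pyRange (tamanio - 1) (-1) (-1)
      = (PySem.List.pyRange 0 tamanio 1).reverse := by
    have h1 : tamanio - 1 + 1 = tamanio := by ring
    rw [PySem.List.pyRange_neg_one_eq_reverse, h1]
    norm_num
  rw [hrev, pv_hasPat_reverse,
    pv_patR_eq_check tablero columna _ (PySem.List.pairwise_lt_pyRange_one 0 tamanio)]
  rfl

theorem verificarFichasFlotantes_eq (tablero : List (List String)) (tamanio : Int) :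
    verificarFichasFlotantes tablero tamanio
      = verificarFichasFlotantes_alt tablero tamanio := by
  unfold verificarFichasFlotantes verificarFichasFlotantes_alt
  have hstep : (fun (columnaFichaFlotante columna : Int) =>
      ((PySem.List.pyRange (tamanio - 1) (-1) (-1)).foldl
        (fun (st : Bool × Int) fila =>
          if pvCell tablero fila columna = "_" then (true, st.2)
          else if st.1 then (st.1, columna) else st)
        (false, columnaFichaFlotante)).2)
      = fun (acc c : Int) => if pvColCheck tablero tamanio c then c else acc := by
    funext r c
    exact pv_column_eq tablero tamanio c r
  rw [hstep, pv_foldl_if_eq_find]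
  have hrev : PySem.List.pyRange (tamanio - 2) (-1) (-1)
      = (PySem.List.pyRange 0 (tamanio - 1) 1).reverse := by
    have h1 : tamanio - 2 + 1 = tamanio - 1 := by ring
    rw [PySem.List.pyRange_neg_one_eq_reverse, h1]
    norm_num
  rw [hrev]

-- ===== VERDICT (by name: the statement is the Claim_ definition above) =====
theorem verificarFichasFlotantes_spec : Claim_equal_verificarFichasFlotantes := by
  intro tablero tamanio _ _
  unfold Spec_verificarFichasFlotantes
  exact verificarFichasFlotantes_eq tablero tamanio
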